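-- pv_equiv track=rewrite | github.com/Educorreia932/Code-Challenges | IEEEXtreme/IEEEXtreme 17.0/Programmer's Poem.py | solve_rhymes
-- ===== SOURCE A (Python) =====
-- def solve_rhymes(rhymes, last_words):
--     rhyme_scheme = ""
--     rhyme_labels = {}
--
--     for i, rhyming_words in enumerate(rhymes):
--         for word in rhyming_words:
--             rhyme_labels[word] = chr(ord("A") + i)
--
--     for word in last_words:
--         if word in rhyme_labels:
--             rhyme_scheme += rhyme_labels[word]
--         else:
--             rhyme_scheme += "X"
--
--     return rhyme_scheme
-- ===== SOURCE B (Python) =====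
-- def solve_rhymes(rhymes, last_words):
--     out = []
--     for word in last_words:
--         label = "X"
--         for i, group in reversed(list(enumerate(rhymes))):
--             if word in group:
--                 label = chr(ord("A") + i)
--                 break
--         out.append(label)
--     return "".join(out)
-- ===== Notes on version B (the rewrite author's own statement) =====
-- stated objective: alternative
-- what changed: B builds no dictionary: for each last word it scans the rhyme groups in reverse and takes the first (i.e. last-in-order) group containing the word, matching A's dict-overwrite semantics; results are collected in a list and joined instead of string concatenation.
import Mathlib
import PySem

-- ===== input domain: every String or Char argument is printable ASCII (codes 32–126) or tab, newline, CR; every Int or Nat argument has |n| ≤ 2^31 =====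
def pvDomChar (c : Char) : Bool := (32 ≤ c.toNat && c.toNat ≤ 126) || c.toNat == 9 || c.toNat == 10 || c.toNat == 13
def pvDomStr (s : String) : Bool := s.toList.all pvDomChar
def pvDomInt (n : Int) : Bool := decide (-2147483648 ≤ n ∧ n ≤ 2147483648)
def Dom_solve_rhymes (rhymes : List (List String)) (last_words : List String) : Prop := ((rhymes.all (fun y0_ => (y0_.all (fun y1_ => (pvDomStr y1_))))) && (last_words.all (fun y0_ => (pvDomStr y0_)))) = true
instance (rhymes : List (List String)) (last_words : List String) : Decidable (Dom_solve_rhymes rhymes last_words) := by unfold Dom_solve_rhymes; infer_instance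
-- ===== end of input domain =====

-- B replaces A's prebuilt word→label dictionary by a per-word reverse scan of the rhyme
-- groups (first match in reverse = last overwrite in A); objective: alternative.

-- ===== PORT A =====
def solve_rhymes (rhymes : List (List String)) (last_words : List String) : String :=
  let rhyme_labels : PySem.Dict String Char :=
    (PySem.List.enumerate rhymes 0).foldl
      (fun d p => p.2.foldl (fun d word => d.insert word (Char.ofNat (65 + p.1.toNat))) d)
      PySem.Dict.empty
  String.mk (last_words.foldl
    (fun acc word =>
      acc ++ [match rhyme_labels.get? word with | some c => c | none => 'X']) [])

-- ===== PORT B =====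
-- scan of reversed(list(enumerate(rhymes))): first group containing the word, else 'X'
def pvLastLabel (groups : List (Int × List String)) (word : String) : Char :=
  match groups with
  | [] => 'X'
  | p :: rest => if word ∈ p.2 then Char.ofNat (65 + p.1.toNat) else pvLastLabel rest word

def solve_rhymes_alt (rhymes : List (List String)) (last_words : List String) : String :=
  String.mk (last_words.map (fun w => pvLastLabel (PySem.List.enumerate rhymes 0).reverse w))

-- ===== PRECONDITION & SPEC =====
def Spec_solve_rhymes (rhymes : List (List String)) (last_words : List String) (out : String) : Prop := out = solve_rhymes_alt rhymes last_words
instance (rhymes : List (List String)) (last_words : List String) (out : String) : Decidable (Spec_solve_rhymes rhymes last_words out) := by unfold Spec_solve_rhymes; infer_instance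

-- ===== CLAIM (what is proved, stated in full; the proofs are below) =====
def Claim_equal_solve_rhymes : Prop := ∀ (rhymes : List (List String)) (last_words : List String), Dom_solve_rhymes rhymes last_words → Spec_solve_rhymes rhymes last_words (solve_rhymes rhymes last_words)

-- ===== LEMMAS AND PROOFS =====

-- Option-valued version of B's scan, for stating the dictionary characterisation.
def pvRevLabel? (groups : List (Int × List String)) (word : String) : Option Char :=
  match groups with
  | [] => none
  | p :: rest => if word ∈ p.2 then some (Char.ofNat (65 + p.1.toNat)) else pvRevLabel? rest word

theorem pvLastLabel_eq_revLabel (groups : List (Int × List String)) (w : String) :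
    pvLastLabel groups w = (pvRevLabel? groups w).getD 'X' := by
  induction groups with
  | nil => rfl
  | cons p rest ih =>
    simp only [pvLastLabel, pvRevLabel?]
    split_ifs <;> simp [ih]

theorem pvRevLabel?_append_singleton (xs : List (Int × List String)) (p : Int × List String)
    (w : String) :
    pvRevLabel? (xs ++ [p]) w =
      match pvRevLabel? xs w with
      | some c => some c
      | none => if w ∈ p.2 then some (Char.ofNat (65 + p.1.toNat)) else none := by
  induction xs with
  | nil => simp [pvRevLabel?]
  | cons q rest ih =>
    simp only [List.cons_append, pvRevLabel?, ih]
    split_ifs <;> rfl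

-- inner loop of A: inserting every word of a group with the same label
theorem get?_insert_group (g : List String) (c : Char) (d : PySem.Dict String Char)
    (w : String) :
    (g.foldl (fun d word => d.insert word c) d).get? w =
      if w ∈ g then some c else d.get? w := by
  induction g generalizing d with
  | nil => simp
  | cons u g' ih =>
    simp only [List.foldl_cons, ih, List.mem_cons]
    by_cases hg : w ∈ g'
    · simp [hg]
    · by_cases hu : w = u
      · simp [hu, PySem.Dict.get?_insert_self]
      · simp [hg, hu, PySem.Dict.get?_insert_of_ne _ _ hu]

-- A's dictionary looked up at w is exactly B's reverse scan (last group wins).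
theorem get?_build_eq (groups : List (Int × List String)) (d : PySem.Dict String Char)
    (w : String) :
    ((groups.foldl
        (fun d p => p.2.foldl (fun d word => d.insert word (Char.ofNat (65 + p.1.toNat))) d)
        d).get? w) =
      match pvRevLabel? groups.reverse w with
      | some c => some c
      | none => d.get? w := by
  induction groups generalizing d with
  | nil => simp [pvRevLabel?]
  | cons p rest ih =>
    simp only [List.foldl_cons, List.reverse_cons, ih,
      pvRevLabel?_append_singleton, get?_insert_group]
    cases hr : pvRevLabel? rest.reverse w <;> split_ifs <;> simp

-- ===== VERDICT (by name: the statement is the Claim_ definition above) =====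
theorem solve_rhymes_spec : Claim_equal_solve_rhymes := by
  intro rhymes last_words _
  unfold Spec_solve_rhymes solve_rhymes solve_rhymes_alt
  dsimp only
  rw [PySem.List.foldl_append_singleton_eq_map]
  simp only [List.nil_append]
  congr 1
  apply List.map_congr_left
  intro w _
  rw [get?_build_eq, pvLastLabel_eq_revLabel]
  cases pvRevLabel? (PySem.List.enumerate rhymes 0).reverse w <;> simp [PySem.Dict.get?_empty]
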